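-- pv_equiv track=rewrite | github.com/ThaumielSparrow/LodeRunner | code/tools/xml.py | unescape_special_characters
-- ===== SOURCE A (Python) =====
-- def unescape_special_characters(s):
--
--     reverse_translations = {
--         "&nbsp;": " ",
--         "&lt;": "<",
--         "&gt;": ">",
--         "&equals;": "="
--     }
--
--     for key in reverse_translations:
--         s = s.replace(key, reverse_translations[key])
--
--     return s
-- ===== SOURCE B (Python) =====
-- def unescape_special_characters(s):
--     entities = {"&nbsp;": " ", "&lt;": "<", "&gt;": ">", "&equals;": "="}
--     out = []
--     i = 0
--     n = len(s)
--     while i < n: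
--         for key, val in entities.items():
--             if s.startswith(key, i):
--                 out.append(val)
--                 i += len(key)
--                 break
--         else:
--             out.append(s[i])
--             i += 1
--     return "".join(out)
-- ===== Notes on version B (the rewrite author's own statement) =====
-- stated objective: alternative
-- what changed: A makes four sequential full-string .replace passes (one per entity); B makes a single left-to-right scan that tries the four entity keys at each position and copies a character otherwise, building the output in one traversal.
import Mathlib
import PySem

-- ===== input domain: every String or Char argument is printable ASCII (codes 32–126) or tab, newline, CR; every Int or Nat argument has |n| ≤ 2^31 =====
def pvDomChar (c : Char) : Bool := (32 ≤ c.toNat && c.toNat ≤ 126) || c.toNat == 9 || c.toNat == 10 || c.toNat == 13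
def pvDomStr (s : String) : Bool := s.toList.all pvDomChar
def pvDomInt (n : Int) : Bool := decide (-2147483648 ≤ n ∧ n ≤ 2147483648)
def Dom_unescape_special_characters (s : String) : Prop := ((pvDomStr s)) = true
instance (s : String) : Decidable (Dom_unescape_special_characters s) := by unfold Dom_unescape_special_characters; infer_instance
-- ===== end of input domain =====

-- B replaces A's four sequential full-string .replace passes by one left-to-right scan
-- that recognises the four entities in a single traversal (objective: alternative).

-- ===== PORT A =====
-- literal transliteration of A: the dict's four keys in insertion order, one s.replace per key
def unescape_special_characters (s : String) : String :=
  let s1 := PySem.Str.replace s "&nbsp;" " "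
  let s2 := PySem.Str.replace s1 "&lt;" "<"
  let s3 := PySem.Str.replace s2 "&gt;" ">"
  PySem.Str.replace s3 "&equals;" "="

-- ===== PORT B =====
-- B's single pass: at each position try the four keys in dict order (startswith), else copy one char
def uscScan : List Char → List Char
  | [] => []
  | c :: t =>
    if ("&nbsp;".toList).isPrefixOf (c :: t) then ' ' :: uscScan ((c :: t).drop 6)
    else if ("&lt;".toList).isPrefixOf (c :: t) then '<' :: uscScan ((c :: t).drop 4)
    else if ("&gt;".toList).isPrefixOf (c :: t) then '>' :: uscScan ((c :: t).drop 4)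
    else if ("&equals;".toList).isPrefixOf (c :: t) then '=' :: uscScan ((c :: t).drop 8)
    else c :: uscScan t
  termination_by l => l.length
  decreasing_by
    all_goals simp



def unescape_special_characters_alt (s : String) : String :=
  String.ofList (uscScan s.toList)

-- ===== PRECONDITION & SPEC =====
def Spec_unescape_special_characters (s : String) (out : String) : Prop := out = unescape_special_characters_alt s
instance (s : String) (out : String) : Decidable (Spec_unescape_special_characters s out) := by unfold Spec_unescape_special_characters; infer_instance

-- ===== CLAIM (what is proved, stated in full; the proofs are below) =====
def Claim_equal_unescape_special_characters : Prop := ∀ (s : String), Dom_unescape_special_characters s → Spec_unescape_special_characters s (unescape_special_characters s)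

-- ===== LEMMAS AND PROOFS =====

-- clean structural model of one Python s.replace(o::old', [u]) pass (single-char replacement)
def uscRep (o : Char) (old' : List Char) (u : Char) : List Char → List Char
  | [] => []
  | c :: t =>
    if (o :: old').isPrefixOf (c :: t) then u :: uscRep o old' u (t.drop old'.length)
    else c :: uscRep o old' u t
  termination_by l => l.length
  decreasing_by
    all_goals simp

theorem uscRep_go (o : Char) (old' : List Char) (u : Char) :
    ∀ (fuel : Nat) (l acc : List Char), l.length ≤ fuel →
      PySem.Chars.replace.go (o :: old') [u] fuel l acc = acc.reverse ++ uscRep o old' u l := by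
  intro fuel
  induction fuel with
  | zero =>
    intro l acc h
    have : l = [] := by cases l <;> simp_all
    subst this
    rw [PySem.Chars.replace.go.eq_def]
    simp [uscRep]
  | succ n ih =>
    intro l acc h
    cases l with
    | nil => rw [PySem.Chars.replace.go.eq_def]; simp [uscRep]
    | cons c t =>
      rw [PySem.Chars.replace.go.eq_def]
      by_cases hp : (o :: old').isPrefixOf (c :: t) = true
      · have hlen : (List.drop old'.length t).length ≤ n := by
          simp at h ⊢; omega
        rw [uscRep]
        simp only [hp, if_pos, List.length_cons, List.drop_succ_cons]
        rw [ih _ _ hlen]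
        simp
      · rw [uscRep]
        simp only [hp, if_neg, List.drop_succ_cons, Bool.false_eq_true, if_false]
        rw [ih t (c :: acc) (by simp at h ⊢; omega)]
        simp

theorem replace_eq_uscRep (o : Char) (old' : List Char) (u : Char) (l : List Char) :
    PySem.Chars.replace l (o :: old') [u] = uscRep o old' u l := by
  rw [PySem.Chars.replace]
  simp [uscRep_go o old' u l.length l [] (le_refl _)]

theorem uscRep_nil (o : Char) (old' : List Char) (u : Char) : uscRep o old' u [] = [] := by
  rw [uscRep]

theorem uscRep_key_append (o : Char) (old' : List Char) (u : Char) (t : List Char) :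
    uscRep o old' u ((o :: old') ++ t) = u :: uscRep o old' u t := by
  rw [List.cons_append, uscRep]
  simp

theorem uscRep_nomatch_cons (o : Char) (old' : List Char) (u : Char) (c : Char) (t : List Char)
    (h : ¬ (o :: old') <+: (c :: t)) :
    uscRep o old' u (c :: t) = c :: uscRep o old' u t := by
  rw [uscRep]
  simp [List.isPrefixOf_iff_prefix, h]

theorem uscRep_prefix_transfer (o : Char) (old' : List Char) (u : Char) :
    ∀ (t x : List Char), x ≠ [] → u ∉ x → x <+: uscRep o old' u t → x <+: t := by
  intro t
  induction t with
  | nil => intro x hx _ h; rw [uscRep_nil] at h; exact absurd (List.prefix_nil.mp h) hx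
  | cons c t ih =>
    intro x hx hu h
    by_cases hp : (o :: old') <+: (c :: t)
    · rw [uscRep, if_pos (List.isPrefixOf_iff_prefix.mpr hp)] at h
      cases x with
      | nil => exact absurd rfl hx
      | cons a x' =>
        rw [List.cons_prefix_cons] at h
        obtain ⟨rfl, -⟩ := h
        exact (hu List.mem_cons_self).elim
    · rw [uscRep_nomatch_cons _ _ _ _ _ hp] at h
      cases x with
      | nil => exact absurd rfl hx
      | cons a x' =>
        rw [List.cons_prefix_cons] at h ⊢
        refine ⟨h.1, ?_⟩
        cases x' with
        | nil => exact List.nil_prefix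
        | cons b x'' =>
          exact ih _ (by simp) (fun hm => hu (List.mem_cons_of_mem _ hm)) h.2

-- pass-through: a uscRep pass copies a char at which its key ('&'-initial) cannot start
theorem uscRep_pass (old' : List Char) (u c : Char) (x : List Char) (hc : c ≠ '&') :
    uscRep '&' old' u (c :: x) = c :: uscRep '&' old' u x := by
  apply uscRep_nomatch_cons
  rw [List.cons_prefix_cons]
  intro h; exact hc h.1.symm

-- a pass whose key '&'::a::r mismatches at the second char copies the '&' too
theorem uscRep_amp_mismatch (a : Char) (r : List Char) (u d : Char) (x : List Char) (h : a ≠ d) :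
    uscRep '&' (a :: r) u ('&'::d::x) = '&' :: uscRep '&' (a :: r) u (d::x) := by
  apply uscRep_nomatch_cons
  rw [List.cons_prefix_cons, List.cons_prefix_cons]
  rintro ⟨-, h2, -⟩; exact h h2


-- matched-key lemmas, cons-normal form
theorem match1 (X : List Char) :
    uscRep '&' ['n','b','s','p',';'] ' ' ('&'::'n'::'b'::'s'::'p'::';'::X)
      = ' ' :: uscRep '&' ['n','b','s','p',';'] ' ' X := by
  simpa using uscRep_key_append '&' ['n','b','s','p',';'] ' ' X

theorem match2 (X : List Char) :
    uscRep '&' ['l','t',';'] '<' ('&'::'l'::'t'::';'::X)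
      = '<' :: uscRep '&' ['l','t',';'] '<' X := by
  simpa using uscRep_key_append '&' ['l','t',';'] '<' X

theorem match3 (X : List Char) :
    uscRep '&' ['g','t',';'] '>' ('&'::'g'::'t'::';'::X)
      = '>' :: uscRep '&' ['g','t',';'] '>' X := by
  simpa using uscRep_key_append '&' ['g','t',';'] '>' X

theorem match4 (X : List Char) :
    uscRep '&' ['e','q','u','a','l','s',';'] '=' ('&'::'e'::'q'::'u'::'a'::'l'::'s'::';'::X)
      = '=' :: uscRep '&' ['e','q','u','a','l','s',';'] '=' X := by
  simpa using uscRep_key_append '&' ['e','q','u','a','l','s',';'] '=' X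

-- walk lemmas: an earlier pass copies a later key unchanged
theorem walk1_k2 (X : List Char) :
    uscRep '&' ['n','b','s','p',';'] ' ' ('&'::'l'::'t'::';'::X)
      = '&'::'l'::'t'::';':: uscRep '&' ['n','b','s','p',';'] ' ' X := by
  rw [uscRep_amp_mismatch _ _ _ _ _ (by decide), uscRep_pass _ _ _ _ (by decide),
      uscRep_pass _ _ _ _ (by decide), uscRep_pass _ _ _ _ (by decide)]

theorem walk1_k3 (X : List Char) :
    uscRep '&' ['n','b','s','p',';'] ' ' ('&'::'g'::'t'::';'::X)
      = '&'::'g'::'t'::';':: uscRep '&' ['n','b','s','p',';'] ' ' X := by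
  rw [uscRep_amp_mismatch _ _ _ _ _ (by decide), uscRep_pass _ _ _ _ (by decide),
      uscRep_pass _ _ _ _ (by decide), uscRep_pass _ _ _ _ (by decide)]

theorem walk2_k3 (X : List Char) :
    uscRep '&' ['l','t',';'] '<' ('&'::'g'::'t'::';'::X)
      = '&'::'g'::'t'::';':: uscRep '&' ['l','t',';'] '<' X := by
  rw [uscRep_amp_mismatch _ _ _ _ _ (by decide), uscRep_pass _ _ _ _ (by decide),
      uscRep_pass _ _ _ _ (by decide), uscRep_pass _ _ _ _ (by decide)]

theorem walk1_k4 (X : List Char) :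
    uscRep '&' ['n','b','s','p',';'] ' ' ('&'::'e'::'q'::'u'::'a'::'l'::'s'::';'::X)
      = '&'::'e'::'q'::'u'::'a'::'l'::'s'::';':: uscRep '&' ['n','b','s','p',';'] ' ' X := by
  rw [uscRep_amp_mismatch _ _ _ _ _ (by decide)]
  rw [uscRep_pass _ _ _ _ (by decide), uscRep_pass _ _ _ _ (by decide),
      uscRep_pass _ _ _ _ (by decide), uscRep_pass _ _ _ _ (by decide),
      uscRep_pass _ _ _ _ (by decide), uscRep_pass _ _ _ _ (by decide),
      uscRep_pass _ _ _ _ (by decide)]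

theorem walk2_k4 (X : List Char) :
    uscRep '&' ['l','t',';'] '<' ('&'::'e'::'q'::'u'::'a'::'l'::'s'::';'::X)
      = '&'::'e'::'q'::'u'::'a'::'l'::'s'::';':: uscRep '&' ['l','t',';'] '<' X := by
  rw [uscRep_amp_mismatch _ _ _ _ _ (by decide)]
  rw [uscRep_pass _ _ _ _ (by decide), uscRep_pass _ _ _ _ (by decide),
      uscRep_pass _ _ _ _ (by decide), uscRep_pass _ _ _ _ (by decide),
      uscRep_pass _ _ _ _ (by decide), uscRep_pass _ _ _ _ (by decide),
      uscRep_pass _ _ _ _ (by decide)]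

theorem walk3_k4 (X : List Char) :
    uscRep '&' ['g','t',';'] '>' ('&'::'e'::'q'::'u'::'a'::'l'::'s'::';'::X)
      = '&'::'e'::'q'::'u'::'a'::'l'::'s'::';':: uscRep '&' ['g','t',';'] '>' X := by
  rw [uscRep_amp_mismatch _ _ _ _ _ (by decide)]
  rw [uscRep_pass _ _ _ _ (by decide), uscRep_pass _ _ _ _ (by decide),
      uscRep_pass _ _ _ _ (by decide), uscRep_pass _ _ _ _ (by decide),
      uscRep_pass _ _ _ _ (by decide), uscRep_pass _ _ _ _ (by decide),
      uscRep_pass _ _ _ _ (by decide)]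

theorem main_aux : ∀ (n : Nat) (l : List Char), l.length ≤ n →
    uscRep '&' ['e','q','u','a','l','s',';'] '='
      (uscRep '&' ['g','t',';'] '>'
        (uscRep '&' ['l','t',';'] '<'
          (uscRep '&' ['n','b','s','p',';'] ' ' l))) = uscScan l := by
  intro n
  induction n with
  | zero =>
    intro l h
    have hl : l = [] := by cases l <;> simp_all
    subst hl
    simp [uscRep_nil, uscScan]
  | succ n ih =>
    intro l h
    cases l with
    | nil => simp [uscRep_nil, uscScan]
    | cons c t =>
      by_cases h1 : (['&','n','b','s','p',';'] : List Char) <+: (c :: t)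
      · obtain ⟨t', ht⟩ := h1
        simp only [List.cons_append, List.nil_append] at ht
        rw [← ht]
        have hlen : t'.length ≤ n := by
          have := congrArg List.length ht; simp at this h; omega
        rw [match1, uscRep_pass _ _ _ _ (by decide), uscRep_pass _ _ _ _ (by decide),
            uscRep_pass _ _ _ _ (by decide), ih t' hlen, uscScan,
            if_pos (by simp [show ("&nbsp;".toList : List Char) = ['&','n','b','s','p',';'] from rfl,
                             List.isPrefixOf_iff_prefix, List.cons_prefix_cons])]
        simp
      by_cases h2 : (['&','l','t',';'] : List Char) <+: (c :: t)
      · obtain ⟨t', ht⟩ := h2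
        simp only [List.cons_append, List.nil_append] at ht
        rw [← ht]
        have hlen : t'.length ≤ n := by
          have := congrArg List.length ht; simp at this h; omega
        rw [walk1_k2, match2, uscRep_pass _ _ _ _ (by decide), uscRep_pass _ _ _ _ (by decide),
            ih t' hlen, uscScan,
            if_neg (by simp [show ("&nbsp;".toList : List Char) = ['&','n','b','s','p',';'] from rfl,
                             List.isPrefixOf_iff_prefix, List.cons_prefix_cons]),
            if_pos (by simp [show ("&lt;".toList : List Char) = ['&','l','t',';'] from rfl,
                             List.isPrefixOf_iff_prefix, List.cons_prefix_cons])]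
        simp
      by_cases h3 : (['&','g','t',';'] : List Char) <+: (c :: t)
      · obtain ⟨t', ht⟩ := h3
        simp only [List.cons_append, List.nil_append] at ht
        rw [← ht]
        have hlen : t'.length ≤ n := by
          have := congrArg List.length ht; simp at this h; omega
        rw [walk1_k3, walk2_k3, match3, uscRep_pass _ _ _ _ (by decide),
            ih t' hlen, uscScan,
            if_neg (by simp [show ("&nbsp;".toList : List Char) = ['&','n','b','s','p',';'] from rfl,
                             List.isPrefixOf_iff_prefix, List.cons_prefix_cons]),
            if_neg (by simp [show ("&lt;".toList : List Char) = ['&','l','t',';'] from rfl,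
                             List.isPrefixOf_iff_prefix, List.cons_prefix_cons]),
            if_pos (by simp [show ("&gt;".toList : List Char) = ['&','g','t',';'] from rfl,
                             List.isPrefixOf_iff_prefix, List.cons_prefix_cons])]
        simp
      by_cases h4 : (['&','e','q','u','a','l','s',';'] : List Char) <+: (c :: t)
      · obtain ⟨t', ht⟩ := h4
        simp only [List.cons_append, List.nil_append] at ht
        rw [← ht]
        have hlen : t'.length ≤ n := by
          have := congrArg List.length ht; simp at this h; omega
        rw [walk1_k4, walk2_k4, walk3_k4, match4,
            ih t' hlen, uscScan,
            if_neg (by simp [show ("&nbsp;".toList : List Char) = ['&','n','b','s','p',';'] from rfl,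
                             List.isPrefixOf_iff_prefix, List.cons_prefix_cons]),
            if_neg (by simp [show ("&lt;".toList : List Char) = ['&','l','t',';'] from rfl,
                             List.isPrefixOf_iff_prefix, List.cons_prefix_cons]),
            if_neg (by simp [show ("&gt;".toList : List Char) = ['&','g','t',';'] from rfl,
                             List.isPrefixOf_iff_prefix, List.cons_prefix_cons]),
            if_pos (by simp [show ("&equals;".toList : List Char) = ['&','e','q','u','a','l','s',';'] from rfl,
                             List.isPrefixOf_iff_prefix, List.cons_prefix_cons])]
        simp
      -- default: no key starts at this position, in either program
      · have hlen : t.length ≤ n := by simp at h; omega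
        have h2' : ¬ (('&'::['l','t',';']) <+: (c :: uscRep '&' ['n','b','s','p',';'] ' ' t)) := by
          intro hp
          rw [List.cons_prefix_cons] at hp
          obtain ⟨hc, hx⟩ := hp
          exact h2 (List.cons_prefix_cons.mpr
            ⟨hc, uscRep_prefix_transfer _ _ _ t _ (by decide) (by decide) hx⟩)
        have h3' : ¬ (('&'::['g','t',';']) <+:
            (c :: uscRep '&' ['l','t',';'] '<' (uscRep '&' ['n','b','s','p',';'] ' ' t))) := by
          intro hp
          rw [List.cons_prefix_cons] at hp
          obtain ⟨hc, hx⟩ := hp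
          have := uscRep_prefix_transfer _ _ _ _ _ (by decide) (by decide) hx
          exact h3 (List.cons_prefix_cons.mpr
            ⟨hc, uscRep_prefix_transfer _ _ _ t _ (by decide) (by decide) this⟩)
        have h4' : ¬ (('&'::['e','q','u','a','l','s',';']) <+:
            (c :: uscRep '&' ['g','t',';'] '>'
              (uscRep '&' ['l','t',';'] '<' (uscRep '&' ['n','b','s','p',';'] ' ' t)))) := by
          intro hp
          rw [List.cons_prefix_cons] at hp
          obtain ⟨hc, hx⟩ := hp
          have := uscRep_prefix_transfer _ _ _ _ _ (by decide) (by decide) hx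
          have := uscRep_prefix_transfer _ _ _ _ _ (by decide) (by decide) this
          exact h4 (List.cons_prefix_cons.mpr
            ⟨hc, uscRep_prefix_transfer _ _ _ t _ (by decide) (by decide) this⟩)
        rw [uscRep_nomatch_cons _ _ _ _ _ h1, uscRep_nomatch_cons _ _ _ _ _ h2',
            uscRep_nomatch_cons _ _ _ _ _ h3', uscRep_nomatch_cons _ _ _ _ _ h4',
            ih t hlen, uscScan,
            if_neg (by simp only [show ("&nbsp;".toList : List Char) = ['&','n','b','s','p',';'] from rfl,
                                  List.isPrefixOf_iff_prefix]; exact h1),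
            if_neg (by simp only [show ("&lt;".toList : List Char) = ['&','l','t',';'] from rfl,
                                  List.isPrefixOf_iff_prefix]; exact h2),
            if_neg (by simp only [show ("&gt;".toList : List Char) = ['&','g','t',';'] from rfl,
                                  List.isPrefixOf_iff_prefix]; exact h3),
            if_neg (by simp only [show ("&equals;".toList : List Char) = ['&','e','q','u','a','l','s',';'] from rfl,
                                  List.isPrefixOf_iff_prefix]; exact h4)]

-- ===== VERDICT (by name: the statement is the Claim_ definition above) =====
theorem unescape_special_characters_spec : Claim_equal_unescape_special_characters := by
  intro s _
  unfold Spec_unescape_special_characters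
  have h : (unescape_special_characters s).toList = uscScan s.toList := by
    simp only [unescape_special_characters, PySem.Str.toList_replace]
    rw [show ("&nbsp;".toList : List Char) = '&' :: ['n','b','s','p',';'] from rfl,
        show (" ".toList : List Char) = [' '] from rfl,
        show ("&lt;".toList : List Char) = '&' :: ['l','t',';'] from rfl,
        show ("<".toList : List Char) = ['<'] from rfl,
        show ("&gt;".toList : List Char) = '&' :: ['g','t',';'] from rfl,
        show (">".toList : List Char) = ['>'] from rfl,
        show ("&equals;".toList : List Char) = '&' :: ['e','q','u','a','l','s',';'] from rfl,
        show ("=".toList : List Char) = ['='] from rfl,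
        replace_eq_uscRep, replace_eq_uscRep, replace_eq_uscRep, replace_eq_uscRep]
    exact main_aux s.toList.length s.toList le_rfl
  unfold unescape_special_characters_alt
  have := congrArg String.ofList h
  simpa using this
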